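-- pv_equiv track=rewrite | github.com/livcristi/Advent-Of-Code | AdventOfCode2024/Advent/Day7/day7.py | get_operators_from_hash_add_mult
-- ===== SOURCE A (Python) =====
-- def get_operators_from_hash_add_mult(operator_hash: int, length: int) -> list[str]:
--     operators = []
--     while operator_hash > 0:
--         if operator_hash % 2 == 0:
--             operators.append("+")
--         else:
--             operators.append("*")
--         operator_hash //= 2
--     operators.extend("+" * (length - len(operators)))
--     return operators
-- ===== SOURCE B (Python) =====
-- def get_operators_from_hash_add_mult(operator_hash: int, length: int) -> list[str]:
--     binary = bin(operator_hash)[2:] if operator_hash > 0 else ""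
--     mapped = binary.translate(str.maketrans("01", "+*"))[::-1]
--     return list(mapped.ljust(length, "+"))
-- ===== Notes on version B (the rewrite author's own statement) =====
-- stated objective: idiomatic
-- what changed: Replaces A's destructive divide-by-2 accumulator loop with loop-free standard-library string pipeline: bin() formats the number, str.translate maps the digit characters 0/1 to +/*, the string is reversed to LSB-first order, and ljust pads with '+' to the requested length.
import Mathlib
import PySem

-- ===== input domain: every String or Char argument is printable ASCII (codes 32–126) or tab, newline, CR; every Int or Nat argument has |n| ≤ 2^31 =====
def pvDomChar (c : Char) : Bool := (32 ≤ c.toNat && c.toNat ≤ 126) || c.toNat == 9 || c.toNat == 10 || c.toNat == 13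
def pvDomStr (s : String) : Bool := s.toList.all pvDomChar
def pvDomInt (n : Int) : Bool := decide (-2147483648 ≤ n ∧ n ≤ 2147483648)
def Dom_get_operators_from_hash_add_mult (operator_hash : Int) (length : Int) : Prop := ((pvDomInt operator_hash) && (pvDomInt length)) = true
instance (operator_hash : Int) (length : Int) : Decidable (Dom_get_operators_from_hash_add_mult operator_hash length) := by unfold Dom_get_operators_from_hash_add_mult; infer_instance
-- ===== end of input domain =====

-- B replaces A's destructive divide-by-2 accumulator loop with a loop-free standard-library
-- string pipeline: bin() / translate("01"→"+*") / [::-1] / ljust padding (objective: idiomatic).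

-- ===== PORT A =====
-- the while loop of A: halves operator_hash, appending one operator per bit
def pvALoop (operator_hash : Int) (operators : List String) : List String :=
  if operator_hash > 0 then
    pvALoop (PySem.Int.floordiv operator_hash 2)
      (operators ++ [if PySem.Int.mod operator_hash 2 = 0 then "+" else "*"])
  else operators
termination_by operator_hash.toNat
decreasing_by
  rename_i h
  rw [PySem.Int.floordiv_eq_ediv_of_pos (by norm_num : (0:Int) < 2)]
  omega

def get_operators_from_hash_add_mult (operator_hash : Int) (length : Int) : List String :=
  let operators := pvALoop operator_hash []
  -- operators.extend("+" * (length - len(operators))): negative repetition is the empty string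
  operators ++ List.replicate (length - operators.length).toNat "+"

-- ===== PORT B =====
def get_operators_from_hash_add_mult_alt (operator_hash : Int) (length : Int) : List String :=
  -- binary = bin(operator_hash)[2:] if operator_hash > 0 else ""
  let binary : List Char :=
    if operator_hash > 0 then PySem.List.slice (PySem.Int.toBinChars0b operator_hash) (some 2) none
    else []
  -- binary.translate(str.maketrans("01", "+*")): hand-ported char map, exact since
  -- the table only maps '0'→'+' and '1'→'*' and leaves every other character unchanged
  let translated : List Char := binary.map (fun c => if c = '0' then '+' else if c = '1' then '*' else c)
  -- [::-1]
  let mapped : List Char := translated.reverse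
  -- mapped.ljust(length, "+"): hand-ported, exact: pad on the right up to width, no-op if width ≤ len
  let padded : List Char := mapped ++ List.replicate (length - mapped.length).toNat '+'
  -- list(...) over a string: one-character strings
  padded.map (fun c => String.mk [c])

-- ===== PRECONDITION & SPEC =====
def Spec_get_operators_from_hash_add_mult (operator_hash : Int) (length : Int) (out : List String) : Prop := out = get_operators_from_hash_add_mult_alt operator_hash length
instance (operator_hash : Int) (length : Int) (out : List String) : Decidable (Spec_get_operators_from_hash_add_mult operator_hash length out) := by unfold Spec_get_operators_from_hash_add_mult; infer_instance

-- ===== CLAIM (what is proved, stated in full; the proofs are below) =====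
def Claim_equal_get_operators_from_hash_add_mult : Prop := ∀ (operator_hash : Int) (length : Int), Dom_get_operators_from_hash_add_mult operator_hash length → Spec_get_operators_from_hash_add_mult operator_hash length (get_operators_from_hash_add_mult operator_hash length)

-- ===== LEMMAS AND PROOFS =====

-- core's fuelled binary printer, characterised by Nat.digits (enough fuel, n < fuel)
theorem pvToDigitsCore_eq : ∀ (fuel : Nat) (n : Nat) (ds : List Char), n < fuel →
    Nat.toDigitsCore 2 fuel n ds =
      (if n = 0 then ['0'] else ((Nat.digits 2 n).map Nat.digitChar).reverse) ++ ds := by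
  intro fuel
  induction fuel with
  | zero => intro n ds h; omega
  | succ f ih =>
    intro n ds h
    rw [Nat.toDigitsCore]
    by_cases h2 : n / 2 = 0
    · rw [if_pos h2]
      have hlt2 : n < 2 := by omega
      interval_cases n
      · simp [Nat.digitChar]
      · simp [Nat.digitChar]
    · rw [if_neg h2]
      have hn : 0 < n := by omega
      have : n / 2 < f := by omega
      rw [ih (n / 2) _ this, if_neg h2,
          Nat.digits_def' (by norm_num : 1 < 2) hn]
      rw [if_neg (by omega : ¬ n = 0)]
      simp

theorem pvToDigits_eq (m : Nat) (hm : 0 < m) :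
    Nat.toDigits 2 m = ((Nat.digits 2 m).map Nat.digitChar).reverse := by
  rw [Nat.toDigits, pvToDigitsCore_eq (m + 1) m [] (by omega), if_neg (by omega)]
  simp

theorem pvALoop_nonpos (h : Int) (acc : List String) (hle : ¬ h > 0) :
    pvALoop h acc = acc := by
  rw [pvALoop]; simp [hle]

-- A's loop, characterised by Nat.digits (LSB first)
theorem pvALoop_digits (m : Nat) : ∀ (acc : List String),
    pvALoop (m : Int) acc = acc ++ (Nat.digits 2 m).map (fun d => if d = 0 then "+" else "*") := by
  induction m using Nat.strong_induction_on with
  | _ m ih =>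
    intro acc
    by_cases hm : 0 < m
    · rw [pvALoop, if_pos (by exact_mod_cast hm : ((m:Int) > 0))]
      have hfd : PySem.Int.floordiv (m:Int) 2 = ((m/2 : Nat):Int) := by
        exact_mod_cast PySem.Int.floordiv_natCast m 2
      have hmod : PySem.Int.mod (m:Int) 2 = ((m % 2 : Nat):Int) := by
        exact_mod_cast PySem.Int.mod_natCast m 2
      rw [hfd, hmod, ih (m/2) (Nat.div_lt_self hm one_lt_two),
          Nat.digits_def' (by norm_num : 1 < 2) hm]
      have : (if ((m % 2 : Nat):Int) = 0 then "+" else "*") = (if m % 2 = 0 then "+" else "*") := by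
        rcases Nat.mod_two_eq_zero_or_one m with h | h <;> simp [h]
      rw [this]
      simp
    · have h0 : m = 0 := by omega
      subst h0
      rw [pvALoop_nonpos _ _ (by norm_num)]
      simp

theorem get_operators_from_hash_add_mult_spec : Claim_equal_get_operators_from_hash_add_mult := by
  intro oh l _
  unfold Spec_get_operators_from_hash_add_mult get_operators_from_hash_add_mult
    get_operators_from_hash_add_mult_alt
  by_cases hpos : oh > 0
  · have hcast : oh = (oh.toNat : Int) := (Int.toNat_of_nonneg (le_of_lt hpos)).symm
    set m := oh.toNat with hmdef
    have hm : 0 < m := by omega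
    -- B's binary string is Nat.toDigits 2 m
    have hbin : PySem.List.slice (PySem.Int.toBinChars0b oh) (some 2) none = Nat.toDigits 2 m := by
      rw [PySem.Int.toBinChars0b, if_neg (by omega : ¬ oh < 0)]
      rw [show (2:Int) = ((2:Nat):Int) from rfl, PySem.List.slice_from_natCast]
      rfl
    rw [if_pos hpos, hbin, pvToDigits_eq m hm, hcast, pvALoop_digits m []]
    simp only [List.nil_append, List.map_reverse, List.reverse_reverse, List.map_map]
    -- both mapped prefixes agree elementwise (binary digits are 0 or 1)
    have hmap : (Nat.digits 2 m).map
          ((fun c => if c = '0' then '+' else if c = '1' then '*' else c) ∘ Nat.digitChar)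
        = (Nat.digits 2 m).map (fun d => if d = 0 then '+' else '*') := by
      apply List.map_congr_left
      intro d hd
      have : d < 2 := Nat.digits_lt_base (by norm_num) hd
      interval_cases d <;> rfl
    rw [hmap]
    simp only [List.map_append, List.map_map, List.map_replicate, List.length_map]
    congr 1
    apply List.map_congr_left
    intro d hd
    have : d < 2 := Nat.digits_lt_base (by norm_num) hd
    interval_cases d <;> rfl
  · rw [if_neg hpos, pvALoop_nonpos _ _ hpos]
    simp
    exact Or.inr rfl

-- ===== VERDICT (by name: the statement is the Claim_ definition above) =====
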